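-- pv_equiv track=rewrite | github.com/ruslan1327/CRM-Optimization-Project | Ödev 4 a.analiz.py | min_cost_assignment
-- ===== SOURCE A (Python) =====
-- def min_cost_assignment(cost_matrix):
--     """
--     Müşteri destek temsilcisi yönlendirme algoritması
--     Dinamik programlama kullanılarak müşteri-temsilci atamasında minimum maliyet hesaplanır.
--     """
--     n, m = len(cost_matrix), len(cost_matrix[0])  # n: müşteri sayısı, m: temsilci sayısı
--     dp = [[float('inf')] * m for _ in range(n)]  # DP tablosu
--
--     # İlk müşteri için her temsilciye atanma maliyetlerini belirle
--     for j in range(m):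
--         dp[0][j] = cost_matrix[0][j]
--
--     # Dinamik Programlama ile DP tablosunu güncelleme
--     for i in range(1, n):
--         for j in range(m):
--             dp[i][j] = min(dp[i-1][k] + cost_matrix[i][j] for k in range(m))
--
--     # Son müşteriye ait en düşük maliyeti döndür
--     return min(dp[n-1])
-- ===== SOURCE B (Python) =====
-- def min_cost_assignment(cost_matrix):
--     total = 0
--     for row in cost_matrix:
--         total += min(row)
--     return total
-- ===== Notes on version B (the rewrite author's own statement) =====
-- stated objective: faster
-- what changed: Since dp[i][j] = min(dp[i-1]) + cost[i][j], the DP collapses to the closed form 'sum over rows of the row minimum', computed in one pass with no table.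
-- outside the precondition, e.g. on min_cost_assignment([[5], [1, 0]]): A returns 6, B returns 5
import Mathlib
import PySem

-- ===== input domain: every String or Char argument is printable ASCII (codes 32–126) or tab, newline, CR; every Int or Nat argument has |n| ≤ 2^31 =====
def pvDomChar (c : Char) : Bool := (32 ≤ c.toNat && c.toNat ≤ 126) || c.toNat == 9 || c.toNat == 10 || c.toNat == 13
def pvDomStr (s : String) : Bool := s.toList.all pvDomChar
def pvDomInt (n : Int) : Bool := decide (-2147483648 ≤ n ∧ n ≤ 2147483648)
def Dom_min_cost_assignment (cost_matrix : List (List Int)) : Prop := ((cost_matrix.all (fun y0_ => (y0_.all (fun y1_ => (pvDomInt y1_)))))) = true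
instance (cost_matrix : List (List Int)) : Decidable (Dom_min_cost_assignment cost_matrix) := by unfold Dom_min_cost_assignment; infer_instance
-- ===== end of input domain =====

-- B replaces A's O(n·m²) row-by-row DP table with the closed form it computes — the sum of each
-- row's minimum — in one pass (objective: faster, asymptotically).

-- ===== PORT A =====
def min_cost_assignment (cost_matrix : List (List Int)) : Int :=
  let n : Nat := cost_matrix.length
  let m : Nat := (cost_matrix.headD []).length
  -- dp[0][j] = cost_matrix[0][j]
  let dp0 : List Int := (PySem.List.pyRange 0 (m : Int) 1).map
      (fun j => PySem.List.pyGetD (cost_matrix.headD []) j 0)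
  -- for i in range(1, n): dp[i][j] = min(dp[i-1][k] + cost_matrix[i][j] for k in range(m))
  let dpLast : List Int := (PySem.List.pyRange 1 (n : Int) 1).foldl
      (fun prev i =>
        (PySem.List.pyRange 0 (m : Int) 1).map (fun j =>
          (PySem.List.min? ((PySem.List.pyRange 0 (m : Int) 1).map (fun k =>
              PySem.List.pyGetD prev k 0 +
              PySem.List.pyGetD (PySem.List.pyGetD cost_matrix i []) j 0))
            (fun x => x)).getD 0)) dp0
  (PySem.List.min? dpLast (fun x => x)).getD 0

-- ===== PORT B =====
def min_cost_assignment_alt (cost_matrix : List (List Int)) : Int :=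
  cost_matrix.foldl
    (fun total row => total + (PySem.List.min? row (fun x => x)).getD 0) 0

-- ===== PRECONDITION & SPEC =====
-- Pre_ admits exactly the rectangular nonempty matrices with at least one column; A raises
-- IndexError/ValueError on the empty matrix, on an empty first row and on rows shorter than the
-- first, and on ragged rows LONGER than the first A still returns but silently ignores the extra
-- entries (an artefact of indexing every row by len(row 0)) — B's value there is as defensible.
def Pre_min_cost_assignment (cost_matrix : List (List Int)) : Prop :=
  cost_matrix ≠ [] ∧ 0 < (cost_matrix.headD []).length ∧
    ∀ r ∈ cost_matrix, r.length = (cost_matrix.headD []).length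
instance (cost_matrix : List (List Int)) : Decidable (Pre_min_cost_assignment cost_matrix) := by
  unfold Pre_min_cost_assignment; infer_instance
def pvWitness_min_cost_assignment : List (List Int) := [[1, 2], [3, 4]]

def Spec_min_cost_assignment (cost_matrix : List (List Int)) (out : Int) : Prop :=
  out = min_cost_assignment_alt cost_matrix
instance (cost_matrix : List (List Int)) (out : Int) : Decidable (Spec_min_cost_assignment cost_matrix out) := by
  unfold Spec_min_cost_assignment; infer_instance

-- ===== CLAIM (what is proved, stated in full; the proofs are below) =====
def Claim_equal_min_cost_assignment : Prop := ∀ (cost_matrix : List (List Int)), Dom_min_cost_assignment cost_matrix → Pre_min_cost_assignment cost_matrix → Spec_min_cost_assignment cost_matrix (min_cost_assignment cost_matrix)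

-- ===== LEMMAS AND PROOFS =====

-- min of a shifted list: foldl-min level, right and left addition
lemma foldl_min_map_add_right : ∀ (t : List Int) (x c : Int),
    (t.map (fun y => y + c)).foldl min (x + c) = t.foldl min x + c := by
  intro t
  induction t with
  | nil => intro x c; simp
  | cons y t ih =>
      intro x c
      simp only [List.map_cons, List.foldl_cons]
      rw [show min (x + c) (y + c) = min x y + c by omega, ih]

lemma foldl_min_map_add_left : ∀ (t : List Int) (x c : Int),
    (t.map (fun y => c + y)).foldl min (c + x) = c + t.foldl min x := by
  intro t
  induction t with
  | nil => intro x c; simp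
  | cons y t ih =>
      intro x c
      simp only [List.map_cons, List.foldl_cons]
      rw [show min (c + x) (c + y) = c + min x y by omega, ih]

lemma min_map_add_right (xs : List Int) (c : Int) (h : xs ≠ []) :
    (PySem.List.min? (xs.map (fun y => y + c)) (fun x => x)).getD 0
      = (PySem.List.min? xs (fun x => x)).getD 0 + c := by
  cases xs with
  | nil => exact absurd rfl h
  | cons x t =>
      simp only [List.map_cons, PySem.List.min?_id_cons, Option.getD_some]
      exact foldl_min_map_add_right t x c

lemma min_map_add_left (xs : List Int) (c : Int) (h : xs ≠ []) :
    (PySem.List.min? (xs.map (fun y => c + y)) (fun x => x)).getD 0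
      = c + (PySem.List.min? xs (fun x => x)).getD 0 := by
  cases xs with
  | nil => exact absurd rfl h
  | cons x t =>
      simp only [List.map_cons, PySem.List.min?_id_cons, Option.getD_some]
      exact foldl_min_map_add_left t x c

-- the body of A's outer loop, as a function of the previous dp row and the current cost row
def aStep (m : Nat) (prev row : List Int) : List Int :=
  (PySem.List.pyRange 0 (m : Int) 1).map (fun j =>
    (PySem.List.min? ((PySem.List.pyRange 0 (m : Int) 1).map (fun k =>
        PySem.List.pyGetD prev k 0 + PySem.List.pyGetD row j 0))
      (fun x => x)).getD 0)

lemma map_pyGetD_eq_self (xs : List Int) :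
    (PySem.List.pyRange 0 ((xs.length : Nat) : Int) 1).map (fun j => PySem.List.pyGetD xs j 0) = xs := by
  exact PySem.List.map_pyGetD_pyRange_zero xs 0

lemma aStep_eq (m : Nat) (prev row : List Int) (hp : prev.length = m) (hr : row.length = m) :
    aStep m prev row = row.map (fun x => (PySem.List.min? prev (fun x => x)).getD 0 + x) := by
  subst hp
  unfold aStep
  have hinner : ∀ c : Int,
      (PySem.List.pyRange 0 ((prev.length : Nat) : Int) 1).map
        (fun k => PySem.List.pyGetD prev k 0 + c) = prev.map (fun y => y + c) := by
    intro c
    rw [show (fun k => PySem.List.pyGetD prev k 0 + c)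
          = ((fun y => y + c) ∘ (fun k : Int => PySem.List.pyGetD prev k 0)) from rfl,
        ← List.map_map, map_pyGetD_eq_self]
  by_cases hne : prev = []
  · subst hne
    simp at hr
    simp [hr]
  · calc (PySem.List.pyRange 0 ((prev.length : Nat) : Int) 1).map (fun j =>
          (PySem.List.min? ((PySem.List.pyRange 0 ((prev.length : Nat) : Int) 1).map (fun k =>
              PySem.List.pyGetD prev k 0 + PySem.List.pyGetD row j 0))
            (fun x => x)).getD 0)
        = (PySem.List.pyRange 0 ((prev.length : Nat) : Int) 1).map (fun j =>
            (PySem.List.min? prev (fun x => x)).getD 0 + PySem.List.pyGetD row j 0) := by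
          refine List.map_congr_left ?_
          intro j _
          rw [hinner, min_map_add_right prev _ hne]
      _ = row.map (fun x => (PySem.List.min? prev (fun x => x)).getD 0 + x) := by
          rw [show ((prev.length : Nat) : Int) = ((row.length : Nat) : Int) by rw [hr],
              show (fun j => (PySem.List.min? prev (fun x => x)).getD 0 + PySem.List.pyGetD row j 0)
                = ((fun x => (PySem.List.min? prev (fun x => x)).getD 0 + x)
                    ∘ (fun j : Int => PySem.List.pyGetD row j 0)) from rfl,
              ← List.map_map, map_pyGetD_eq_self]

-- fold invariant: min of the final dp row = min(prev) + Σ row minima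
lemma fold_min (m : Nat) (hm : 0 < m) :
    ∀ (rows : List (List Int)), (∀ r ∈ rows, r.length = m) →
    ∀ (prev : List Int), prev.length = m →
    (PySem.List.min? (rows.foldl (aStep m) prev) (fun x => x)).getD 0
      = rows.foldl (fun t row => t + (PySem.List.min? row (fun x => x)).getD 0)
          ((PySem.List.min? prev (fun x => x)).getD 0) := by
  intro rows
  induction rows with
  | nil => intro _ prev _; simp
  | cons r rows ih =>
      intro hlen prev hp
      have hr : r.length = m := hlen r (by simp)
      have hrne : r ≠ [] := by intro h; subst h; simp at hr; omega
      simp only [List.foldl_cons]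
      rw [aStep_eq m prev r hp hr]
      rw [ih (fun x hx => hlen x (by simp [hx])) _ (by simp [hr])]
      rw [min_map_add_left r _ hrne]

theorem pv_equal (cost_matrix : List (List Int))
    (hpre : Pre_min_cost_assignment cost_matrix) :
    min_cost_assignment cost_matrix = min_cost_assignment_alt cost_matrix := by
  obtain ⟨hne, hm, hrect⟩ := hpre
  cases cost_matrix with
  | nil => exact absurd rfl hne
  | cons r0 rest =>
      simp only [List.headD_cons] at hm hrect
      unfold min_cost_assignment min_cost_assignment_alt
      simp only [List.headD_cons]
      -- the index fold is a fold over the tail rows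
      have hfold :
          List.foldl
            (fun prev i =>
              List.map
                (fun j =>
                  (PySem.List.min?
                    (List.map
                      (fun k => PySem.List.pyGetD prev k 0
                        + PySem.List.pyGetD (PySem.List.pyGetD (r0 :: rest) i []) j 0)
                      (PySem.List.pyRange 0 (r0.length : Int) 1))
                    (fun x => x)).getD 0)
                (PySem.List.pyRange 0 (r0.length : Int) 1))
            (List.map (fun j => PySem.List.pyGetD r0 j 0) (PySem.List.pyRange 0 (r0.length : Int) 1))
            (PySem.List.pyRange 1 ((r0 :: rest).length : Int) 1)
          = List.foldl (aStep r0.length)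
              (List.map (fun j => PySem.List.pyGetD r0 j 0) (PySem.List.pyRange 0 (r0.length : Int) 1))
              rest := by
        exact PySem.List.foldl_pyRange_pyGetD' (r0 :: rest) [] (aStep r0.length) _ (by norm_num)
      rw [hfold, map_pyGetD_eq_self r0]
      rw [fold_min r0.length hm rest (fun r hr => hrect r (by simp [hr])) r0 rfl]
      simp

-- ===== VERDICT (by name: the statement is the Claim_ definition above) =====
theorem min_cost_assignment_spec : Claim_equal_min_cost_assignment := by
  intro cm _ hpre
  unfold Spec_min_cost_assignment
  exact pv_equal cm hpre
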